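-- pv_equiv track=rewrite | github.com/alickzheng/File-tests | workshop11/test.py | bounded_lists
-- ===== SOURCE A (Python) =====
-- def lex_suc(bitlst, bounds):
--     res = bitlst[:]
--     n = len(res) - 1
--     if bitlst == bounds:
--         return bitlst
--     while res[n] == bounds[n]:
--         res[n] = 0
--         n -= 1
--     res[n] += 1
--     return res
--
-- def bounded_lists(upper_bounds):
--     n = len(upper_bounds)
--     last = upper_bounds
--     first = [0] * n
--     res = [first]
--     while res[-1] != last:
--         res += [lex_suc(res[-1], upper_bounds)]
--     return res
-- ===== SOURCE B (Python) =====
-- import itertools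
--
-- def bounded_lists(upper_bounds):
--     ranges = [range(b + 1) for b in upper_bounds]
--     return [list(t) for t in itertools.product(*ranges)]
-- ===== Notes on version B (the rewrite author's own statement) =====
-- stated objective: idiomatic
-- what changed: Replaces the incremental lexicographic-successor carry loop (repeatedly copying the last list and incrementing it) with a direct Cartesian-product enumeration via itertools.product over the ranges [0..b].
import Mathlib
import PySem

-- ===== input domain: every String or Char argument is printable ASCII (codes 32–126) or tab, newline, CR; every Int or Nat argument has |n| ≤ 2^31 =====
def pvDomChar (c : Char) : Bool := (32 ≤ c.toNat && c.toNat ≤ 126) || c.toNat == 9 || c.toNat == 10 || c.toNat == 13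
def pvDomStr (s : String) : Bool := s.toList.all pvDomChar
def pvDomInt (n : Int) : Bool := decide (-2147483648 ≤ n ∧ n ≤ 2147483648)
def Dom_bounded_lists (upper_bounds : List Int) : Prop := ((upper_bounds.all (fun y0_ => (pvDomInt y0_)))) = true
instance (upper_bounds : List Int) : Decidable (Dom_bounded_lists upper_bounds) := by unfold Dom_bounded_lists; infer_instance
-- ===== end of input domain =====

-- B enumerates the same bounded lists with a direct Cartesian product (itertools.product)
-- instead of A's incremental lexicographic-successor carry loop; same output, idiomatic.

-- ===== PORT A =====
-- Python lex_suc's while loop scans indices from the end, zeroing digits equal to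
-- their bound and then incrementing the first unequal one; on the REVERSED lists
-- that is exactly this structural recursion (step for step).
def lexSucGo : List Int → List Int → List Int
  | r :: rs, b :: bs => if r = b then 0 :: lexSucGo rs bs else (r + 1) :: rs
  | rs, _ => rs   -- unreachable in actual calls (equal lengths, lists not fully equal)

-- port of lex_suc(bitlst, bounds)
def lexSuc (bitlst bounds : List Int) : List Int :=
  if bitlst = bounds then bitlst
  else (lexSucGo bitlst.reverse bounds.reverse).reverse

-- the 'while res[-1] != last' loop of bounded_lists, with enough fuel for every
-- terminating run (fuel = prod (b+1) bounds the number of iterations)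
def blLoop (last bounds : List Int) (acc : List (List Int)) (cur : List Int) :
    Nat → List (List Int)
  | 0 => acc
  | fuel + 1 =>
    if cur = last then acc
    else blLoop last bounds (acc ++ [lexSuc cur bounds]) (lexSuc cur bounds) fuel

def bounded_lists (upper_bounds : List Int) : List (List Int) :=
  let n := upper_bounds.length
  let last := upper_bounds
  let first : List Int := List.replicate n 0
  blLoop last upper_bounds [first] first
    ((upper_bounds.map (fun b => (b + 1).toNat)).prod)

-- ===== PORT B =====
-- itertools.product(*ranges) with rightmost coordinate varying fastest:
-- product (b :: bs) = [x :: t | x <- range(b+1), t <- product bs]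
def bounded_lists_alt (upper_bounds : List Int) : List (List Int) :=
  upper_bounds.foldr
    (fun b acc => (PySem.List.pyRange 0 (b + 1) 1).flatMap (fun x => acc.map (x :: ·)))
    [[]]

-- ===== PRECONDITION & SPEC =====
-- A loops forever when some bound is negative (the carry never reaches it); those
-- inputs are excluded — A returns on exactly the inputs with all bounds ≥ 0.
def Pre_bounded_lists (upper_bounds : List Int) : Prop :=
  ∀ b ∈ upper_bounds, 0 ≤ b
instance (upper_bounds : List Int) : Decidable (Pre_bounded_lists upper_bounds) := by
  unfold Pre_bounded_lists; infer_instance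
def pvWitness_bounded_lists : List Int := [2, 1, 3]

def Spec_bounded_lists (upper_bounds : List Int) (out : List (List Int)) : Prop := out = bounded_lists_alt upper_bounds
instance (upper_bounds : List Int) (out : List (List Int)) : Decidable (Spec_bounded_lists upper_bounds out) := by unfold Spec_bounded_lists; infer_instance

-- ===== CLAIM (what is proved, stated in full; the proofs are below) =====
def Claim_equal_bounded_lists : Prop := ∀ (upper_bounds : List Int), Dom_bounded_lists upper_bounds → Pre_bounded_lists upper_bounds → Spec_bounded_lists upper_bounds (bounded_lists upper_bounds)

-- ===== LEMMAS AND PROOFS =====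

-- the successor-step relation A's loop follows, for bound list ub (length carried along)
def SucRel (ub : List Int) (p q : List Int) : Prop :=
  p.length = ub.length ∧ p ≠ ub ∧ lexSuc p ub = q

-- carry helper on an append: if the left parts already differ, the right parts are untouched
theorem lexSucGo_append (rp : List Int) : ∀ (rb a c : List Int), rp.length = rb.length →
    rp ≠ rb → lexSucGo (rp ++ a) (rb ++ c) = lexSucGo rp rb ++ a := by
  induction rp with
  | nil =>
    intro rb a c hl hne
    cases rb with
    | nil => exact absurd rfl hne
    | cons b bs => simp at hl
  | cons r rs ih =>
    intro rb a c hl hne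
    cases rb with
    | nil => simp at hl
    | cons b bs =>
      by_cases hrb : r = b
      · subst hrb
        have hne' : rs ≠ bs := by intro h; exact hne (by rw [h])
        simp [lexSucGo, ih bs a c (by simpa using hl) hne']
      · simp [lexSucGo, hrb]

-- carry helper when all lower digits equal their bounds: zero them, bump the next digit
theorem lexSucGo_all_eq (l : List Int) (x y : Int) (h : x ≠ y) :
    lexSucGo (l ++ [x]) (l ++ [y]) = List.replicate l.length 0 ++ [x + 1] := by
  induction l with
  | nil => simp [lexSucGo, h]
  | cons a as ih => simp [lexSucGo, ih, List.replicate_succ]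

theorem lexSuc_cons_ne (x y : Int) (p bs : List Int) (hl : p.length = bs.length)
    (hne : p ≠ bs) : lexSuc (x :: p) (y :: bs) = x :: lexSuc p bs := by
  have hcons : x :: p ≠ y :: bs := by intro h; exact hne (by injection h)
  simp only [lexSuc, if_neg hcons, if_neg hne, List.reverse_cons]
  rw [lexSucGo_append p.reverse bs.reverse [x] [y] (by simpa using hl)
      (by simpa using hne)]
  simp

theorem lexSuc_cons_eq (x y : Int) (bs : List Int) (h : x ≠ y) :
    lexSuc (x :: bs) (y :: bs) = (x + 1) :: List.replicate bs.length 0 := by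
  have hcons : x :: bs ≠ y :: bs := by intro hc; exact h (by injection hc)
  simp only [lexSuc, if_neg hcons, List.reverse_cons]
  rw [lexSucGo_all_eq bs.reverse x y h]
  simp

-- one unfolding of B's foldr
theorem alt_cons (b : Int) (bs : List Int) :
    bounded_lists_alt (b :: bs) =
      (PySem.List.pyRange 0 (b + 1) 1).flatMap
        (fun x => (bounded_lists_alt bs).map (x :: ·)) := by
  simp [bounded_lists_alt]

-- chain within one fixed block x over the inner enumeration M
theorem block_chain (b : Int) (bs : List Int) (M : List (List Int))
    (hchain : List.IsChain (SucRel bs) M) (x : Int) :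
    List.IsChain (SucRel (b :: bs)) (M.map (x :: ·)) := by
  rw [List.isChain_map]
  refine List.IsChain.imp ?_ hchain
  rintro p q ⟨hplen, hpne, hsuc⟩
  refine ⟨by simp [hplen], ?_, ?_⟩
  · intro h; exact hpne (by injection h)
  · rw [lexSuc_cons_ne x b p bs hplen hpne, hsuc]

-- properties of the first n blocks (x = 0..n-1) of B's enumeration for b :: bs
theorem blocks_props (b : Int) (bs : List Int) (M : List (List Int))
    (hhead : M.head? = some (List.replicate bs.length 0))
    (hlast : M.getLast? = some bs)
    (hchain : List.IsChain (SucRel bs) M) :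
    ∀ n : Nat, 1 ≤ n → (n : Int) ≤ b + 1 →
      (((List.range n).map (fun i => (i : Int))).flatMap
          (fun x => M.map (x :: ·))).head? =
            some (0 :: List.replicate bs.length 0) ∧
      (((List.range n).map (fun i => (i : Int))).flatMap
          (fun x => M.map (x :: ·))).getLast? = some (((n : Int) - 1) :: bs) ∧
      List.IsChain (SucRel (b :: bs))
        (((List.range n).map (fun i => (i : Int))).flatMap
          (fun x => M.map (x :: ·))) := by
  have hM : M ≠ [] := by intro h; simp [h] at hhead
  intro n hn
  induction n with
  | zero => omega
  | succ m ih =>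
    intro hnb
    by_cases hm : m = 0
    · subst hm
      refine ⟨?_, ?_, ?_⟩
      · simp [List.head?_map, hhead]
      · simp [List.getLast?_map, hlast]
      · simpa using block_chain b bs M hchain 0
    · have hm1 : 1 ≤ m := by omega
      have hmb : (m : Int) ≤ b + 1 := by push_cast at hnb ⊢; omega
      obtain ⟨ihh, ihl, ihc⟩ := ih hm1 hmb
      have hsplit :
          ((List.range (m + 1)).map (fun i => (i : Int))).flatMap
              (fun x => M.map (x :: ·)) =
            ((List.range m).map (fun i => (i : Int))).flatMap
              (fun x => M.map (x :: ·)) ++ M.map ((m : Int) :: ·) := by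
        rw [List.range_succ]; simp
      have hGne :
          ((List.range m).map (fun i => (i : Int))).flatMap
            (fun x => M.map (x :: ·)) ≠ [] := by
        intro h; rw [h] at ihh; simp at ihh
      have hblockne : M.map ((m : Int) :: ·) ≠ [] := by
        simpa using hM
      refine ⟨?_, ?_, ?_⟩
      · rw [hsplit, List.head?_append_of_ne_nil _ hGne, ihh]
      · rw [hsplit, List.getLast?_append_of_ne_nil _ hblockne,
          List.getLast?_map, hlast]
        simp only [Option.map_some, Option.some_inj]
        congr 1
        push_cast
        ring
      · rw [hsplit, List.isChain_append]
        refine ⟨ihc, block_chain b bs M hchain _, ?_⟩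
        intro p hp q hq
        rw [ihl, Option.mem_def, Option.some_inj] at hp
        rw [List.head?_map, hhead, Option.mem_def] at hq
        simp only [Option.map_some, Option.some_inj] at hq
        subst hp; subst hq
        have hne : (m : Int) - 1 ≠ b := by push_cast at hnb; omega
        refine ⟨by simp, ?_, ?_⟩
        · intro h; exact hne (by injection h)
        · rw [lexSuc_cons_eq _ b bs hne]
          norm_num

-- B's enumeration: head is all-zeros, last is the bounds, and adjacent entries
-- are linked by the successor step
theorem alt_props : ∀ bs : List Int, (∀ x ∈ bs, 0 ≤ x) →
    (bounded_lists_alt bs).head? = some (List.replicate bs.length 0) ∧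
    (bounded_lists_alt bs).getLast? = some bs ∧
    List.IsChain (SucRel bs) (bounded_lists_alt bs) := by
  intro bs
  induction bs with
  | nil => intro _; exact ⟨rfl, rfl, by simp [bounded_lists_alt]⟩
  | cons b bs ih =>
    intro hpos
    have hb : 0 ≤ b := hpos b (by simp)
    obtain ⟨ihh, ihl, ihc⟩ := ih (fun x hx => hpos x (by simp [hx]))
    have hrange : PySem.List.pyRange 0 (b + 1) 1 =
        (List.range (b + 1).toNat).map (fun i => (i : Int)) := by
      rw [PySem.List.pyRange_one]
      simp
      exact List.map_eq_flatMap
    have h1 : 1 ≤ (b + 1).toNat := by omega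
    have h2 : ((b + 1).toNat : Int) ≤ b + 1 := by omega
    obtain ⟨hh, hl, hc⟩ := blocks_props b bs _ ihh ihl ihc (b + 1).toNat h1 h2
    rw [alt_cons, hrange]
    refine ⟨?_, ?_, hc⟩
    · rw [hh]; rfl
    · rw [hl]
      congr 2
      omega

-- length of B's enumeration = prod (b+1), the fuel A's port is given
theorem alt_length : ∀ bs : List Int, (∀ x ∈ bs, 0 ≤ x) →
    (bounded_lists_alt bs).length = (bs.map (fun b => (b + 1).toNat)).prod := by
  intro bs
  induction bs with
  | nil => intro _; rfl
  | cons b bs ih =>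
    intro hpos
    have hb : 0 ≤ b := hpos b (by simp)
    rw [alt_cons, List.length_flatMap]
    simp only [List.length_map]
    rw [ih (fun x hx => hpos x (by simp [hx]))]
    simp [List.map_const', PySem.List.length_pyRange_one, List.prod_cons]

-- running A's while loop along a successor chain ending at the bounds
theorem loop_run (UB : List Int) :
    ∀ (l : List (List Int)) (cur : List Int) (acc : List (List Int)) (fuel : Nat),
      l.length ≤ fuel →
      List.IsChain (SucRel UB) (cur :: l) →
      (cur :: l).getLast? = some UB →
      blLoop UB UB acc cur fuel = acc ++ l := by
  intro l
  induction l with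
  | nil =>
    intro cur acc fuel _ _ hlast
    have hcur : cur = UB := by simpa using hlast
    cases fuel with
    | zero => simp [blLoop]
    | succ f => simp [blLoop, hcur]
  | cons q l' ih =>
    intro cur acc fuel hfuel hchain hlast
    cases fuel with
    | zero => simp at hfuel
    | succ f =>
      rw [List.isChain_cons_cons] at hchain
      obtain ⟨⟨_, hne, hsuc⟩, hchain'⟩ := hchain
      rw [blLoop, if_neg hne, hsuc]
      rw [ih q (acc ++ [q]) f (by simpa using hfuel) hchain'
        (by simpa [List.getLast?_cons_cons] using hlast)]
      simp

-- ===== VERDICT (by name: the statement is the Claim_ definition above) =====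
theorem bounded_lists_spec : Claim_equal_bounded_lists := by
  intro ub _ hpre
  unfold Spec_bounded_lists
  obtain ⟨hh, hl, hc⟩ := alt_props ub hpre
  have hceq : bounded_lists_alt ub =
      List.replicate ub.length 0 :: (bounded_lists_alt ub).tail :=
    List.eq_cons_of_mem_head? (by rw [hh]; rfl)
  have hlen : (bounded_lists_alt ub).tail.length ≤
      (ub.map (fun b => (b + 1).toNat)).prod := by
    rw [← alt_length ub hpre, hceq]
    simp
  show blLoop ub ub [List.replicate ub.length 0] (List.replicate ub.length 0) _ = _
  rw [loop_run ub (bounded_lists_alt ub).tail (List.replicate ub.length 0)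
      [List.replicate ub.length 0] _ hlen (by rw [← hceq]; exact hc)
      (by rw [← hceq]; exact hl)]
  rw [hceq]
  rfl
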